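-- pv_equiv track=rewrite | github.com/jakekohl/portfolio | backend/lib/github_stats_service.py | merge_contributions
-- ===== SOURCE A (Python) =====
-- from typing import Dict, List, Optional
--
-- def merge_contributions(
--
--   existing: List[Dict[str, int]],
--   new: List[Dict[str, int]]
-- ) -> List[Dict[str, int]]:
--   """Merge new contributions with existing, overwriting overlapping dates"""
--   # Create a dictionary from existing contributions for easy lookup
--   contributions_dict = {item["date"]: item["count"] for item in existing}
--
--   # Update with new contributions (overwrites overlapping dates)
--   for item in new:
--     contributions_dict[item["date"]] = item["count"]
--
--   # Convert back to list and sort by date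
--   merged = [
--     {"date": date, "count": count}
--     for date, count in sorted(contributions_dict.items())
--   ]
--
--   return merged
-- ===== SOURCE B (Python) =====
-- def merge_contributions(existing, new):
--   """Merge new contributions with existing, overwriting overlapping dates"""
--   # sort-then-collapse: stable sort keyed on date, keep the LAST entry of each
--   # equal-date run (new comes after existing, so new wins; later wins within each)
--   pairs = [(item["date"], item["count"]) for item in existing + new]
--   pairs.sort(key=lambda p: p[0])
--   merged = []
--   for date, count in pairs:
--     if merged and merged[-1][0] == date:
--       merged[-1] = (date, count)
--     else:
--       merged.append((date, count))
--   return [{"date": d, "count": c} for d, c in merged]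
-- ===== Notes on version B (the rewrite author's own statement) =====
-- stated objective: alternative
-- what changed: Replaces A's build-a-hash-map-then-sort-its-items pipeline with a single stable sort of existing+new by date followed by collapsing each equal-date run to its last entry (later/new wins), emitting the merged list already in date order.
import Mathlib
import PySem

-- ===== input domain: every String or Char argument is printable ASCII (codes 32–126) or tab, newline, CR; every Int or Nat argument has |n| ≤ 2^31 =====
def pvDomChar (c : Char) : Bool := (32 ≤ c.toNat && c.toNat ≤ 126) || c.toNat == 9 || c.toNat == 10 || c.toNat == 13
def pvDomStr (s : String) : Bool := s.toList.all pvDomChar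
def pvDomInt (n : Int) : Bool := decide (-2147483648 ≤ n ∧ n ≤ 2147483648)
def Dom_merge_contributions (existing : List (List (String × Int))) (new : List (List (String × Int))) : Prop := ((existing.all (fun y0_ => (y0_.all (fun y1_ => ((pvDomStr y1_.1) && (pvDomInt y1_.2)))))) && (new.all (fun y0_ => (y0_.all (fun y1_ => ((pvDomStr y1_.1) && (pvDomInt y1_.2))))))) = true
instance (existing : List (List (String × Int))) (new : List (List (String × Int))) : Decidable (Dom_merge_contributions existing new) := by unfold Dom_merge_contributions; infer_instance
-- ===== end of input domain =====

-- B replaces A's build-a-dict-then-sort with a single stable sort of existing+new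
-- followed by collapsing equal-date runs keeping the last entry (objective: alternative).

-- ===== PORT A =====
-- item[k] for an item dict; none = KeyError is excluded by Pre_, the 0 default is never reached there
def pvItemGet (item : List (String × Int)) (k : String) : Int :=
  ((PySem.Dict.get? ⟨item⟩ k).getD 0)

def merge_contributions (existing : List (List (String × Int))) (new : List (List (String × Int))) : List (List (String × Int)) :=
  -- contributions_dict = {item["date"]: item["count"] for item in existing}
  let cd0 : PySem.Dict Int Int :=
    existing.foldl (fun d item => d.insert (pvItemGet item "date") (pvItemGet item "count")) PySem.Dict.empty
  -- for item in new: contributions_dict[item["date"]] = item["count"]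
  let cd : PySem.Dict Int Int :=
    new.foldl (fun d item => d.insert (pvItemGet item "date") (pvItemGet item "count")) cd0
  -- [{"date": date, "count": count} for date, count in sorted(contributions_dict.items())]
  (PySem.List.sorted2 cd.items (fun p => p.1) (fun p => p.2)).map
    (fun p => [("date", p.1), ("count", p.2)])

-- ===== PORT B =====
-- one collapsing step of Source B's loop over the sorted pairs
def pvCollapse (acc : List (Int × Int)) (p : Int × Int) : List (Int × Int) :=
  match acc.getLast? with
  | some q => if q.1 == p.1 then acc.dropLast ++ [p] else acc ++ [p]
  | none => [p]

def merge_contributions_alt (existing : List (List (String × Int))) (new : List (List (String × Int))) : List (List (String × Int)) :=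
  let pairs := (existing ++ new).map (fun item => (pvItemGet item "date", pvItemGet item "count"))
  let ss := PySem.List.sorted pairs (fun p => p.1) false
  let merged := ss.foldl pvCollapse []
  merged.map (fun p => [("date", p.1), ("count", p.2)])

-- ===== PRECONDITION & SPEC =====
-- Pre_: every item dict has the keys "date" and "count" (Python raises KeyError otherwise)
def Pre_merge_contributions (existing : List (List (String × Int))) (new : List (List (String × Int))) : Prop :=
  (∀ item ∈ existing, (PySem.Dict.get? (⟨item⟩ : PySem.Dict String Int) "date").isSome ∧ (PySem.Dict.get? (⟨item⟩ : PySem.Dict String Int) "count").isSome) ∧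
  (∀ item ∈ new, (PySem.Dict.get? (⟨item⟩ : PySem.Dict String Int) "date").isSome ∧ (PySem.Dict.get? (⟨item⟩ : PySem.Dict String Int) "count").isSome)
instance (existing : List (List (String × Int))) (new : List (List (String × Int))) : Decidable (Pre_merge_contributions existing new) := by unfold Pre_merge_contributions; infer_instance

def pvWitness_merge_contributions : (List (List (String × Int))) × (List (List (String × Int))) :=
  ([[("date", 1), ("count", 2)]], [[("date", 1), ("count", 3)], [("date", 0), ("count", 7)]])

def Spec_merge_contributions (existing : List (List (String × Int))) (new : List (List (String × Int))) (out : List (List (String × Int))) : Prop := out = merge_contributions_alt existing new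
instance (existing : List (List (String × Int))) (new : List (List (String × Int))) (out : List (List (String × Int))) : Decidable (Spec_merge_contributions existing new out) := by unfold Spec_merge_contributions; infer_instance

-- ===== CLAIM (what is proved, stated in full; the proofs are below) =====
def Claim_equal_merge_contributions : Prop := ∀ (existing : List (List (String × Int))) (new : List (List (String × Int))), Dom_merge_contributions existing new → Pre_merge_contributions existing new → Spec_merge_contributions existing new (merge_contributions existing new)

-- ===== LEMMAS AND PROOFS =====

-- last value paired with key k in ps (0 if absent) — the value A's dict ends up storing at k
def pvFVal (ps : List (Int × Int)) (k : Int) : Int :=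
  ps.foldl (fun v p => if p.1 = k then p.2 else v) 0

-- the dict built by A's insert loop stores, at each key, the last value seen for it
theorem pvGetD_foldl_insert (ps : List (Int × Int)) (d : PySem.Dict Int Int) (k : Int) :
    (ps.foldl (fun d p => d.insert p.1 p.2) d).getD k 0
      = ps.foldl (fun v p => if p.1 = k then p.2 else v) (d.getD k 0) := by
  induction ps generalizing d with
  | nil => rfl
  | cons p ps ih =>
      simp only [List.foldl_cons, ih]
      by_cases h : p.1 = k
      · subst h; rw [PySem.Dict.getD_insert_self]; simp
      · rw [PySem.Dict.getD_insert_of_ne _ _ _ (Ne.symm h)]; simp [h]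

-- a fold that ignores non-k entries only sees the k-filtered list
theorem pvFoldl_filter (l : List (Int × Int)) (k : Int) (v : Int) :
    l.foldl (fun v p => if p.1 = k then p.2 else v) v
      = (l.filter (fun p => p.1 == k)).foldl (fun v p => if p.1 = k then p.2 else v) v := by
  induction l generalizing v with
  | nil => rfl
  | cons p l ih =>
      by_cases h : p.1 = k <;> simp [h, ih]

-- stability of PySem's insertion sort: insertBy into a key-sorted list preserves each key's run
theorem pvInsertBy_filter (x : Int × Int) (acc : List (Int × Int)) (k : Int)
    (h : acc.Pairwise (fun a b => a.1 ≤ b.1)) :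
    (PySem.List.insertBy (fun a b => decide (a.1 < b.1)) x acc).filter (fun p => p.1 == k)
      = if x.1 == k then acc.filter (fun p => p.1 == k) ++ [x]
        else acc.filter (fun p => p.1 == k) := by
  induction acc with
  | nil =>
      by_cases hx : x.1 = k <;> simp [PySem.List.insertBy, hx]
  | cons y ys ih =>
      rw [List.pairwise_cons] at h
      obtain ⟨hy, hys⟩ := h
      by_cases hlt : x.1 < y.1
      · have hred : PySem.List.insertBy (fun a b => decide (a.1 < b.1)) x (y :: ys)
            = x :: y :: ys := by
          simp [PySem.List.insertBy, hlt]
        rw [hred]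
        by_cases hx : x.1 = k
        · have hnil : (y :: ys).filter (fun p : Int × Int => p.1 == k) = [] := by
            rw [List.filter_eq_nil_iff]
            intro z hz
            have hz1 : y.1 ≤ z.1 := by
              rcases List.mem_cons.mp hz with rfl | hz'
              · exact le_refl _
              · exact hy z hz'
            simp only [beq_iff_eq]
            omega
          simp [hx, hnil]
        · simp [hx]
      · have hred : PySem.List.insertBy (fun a b => decide (a.1 < b.1)) x (y :: ys)
            = y :: PySem.List.insertBy (fun a b => decide (a.1 < b.1)) x ys := by
          simp [PySem.List.insertBy, hlt]
        rw [hred]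
        have ihy := ih hys
        by_cases hyk : y.1 = k <;> by_cases hx : x.1 = k <;>
          simp [hyk, hx, ihy]

-- filtering by a key commutes with the stable sort
theorem pvFilter_sorted (ps : List (Int × Int)) (k : Int) :
    (PySem.List.sorted ps (fun p => p.1) false).filter (fun p => p.1 == k)
      = ps.filter (fun p => p.1 == k) := by
  induction ps using List.reverseRecOn with
  | nil => rfl
  | append_singleton ps p ih =>
      have hstep : PySem.List.sorted (ps ++ [p]) (fun p => p.1) false
          = PySem.List.insertBy (fun a b => decide (a.1 < b.1)) p
              (PySem.List.sorted ps (fun p => p.1) false) := by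
        rw [PySem.List.sorted_eq_foldl_insertBy, PySem.List.sorted_eq_foldl_insertBy,
          List.foldl_append]
        rfl
      rw [hstep, pvInsertBy_filter p _ k (PySem.List.sorted_pairwise ps (fun p => p.1)),
        List.filter_append]
      by_cases hp : p.1 = k <;> simp [ih, hp]

theorem pvFVal_sorted (ps : List (Int × Int)) (k : Int) :
    pvFVal (PySem.List.sorted ps (fun p => p.1) false) k = pvFVal ps k := by
  unfold pvFVal
  rw [pvFoldl_filter, pvFilter_sorted, ← pvFoldl_filter]

-- PySem.Set.ofList is a subsequence of its input
theorem pvFoldl_add_sublist (xs : List Int) (s : List Int) :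
    ∃ t, List.foldl PySem.Set.add s xs = s ++ t ∧ t.Sublist xs := by
  induction xs generalizing s with
  | nil => exact ⟨[], by simp⟩
  | cons x xs ih =>
      simp only [List.foldl_cons, PySem.Set.add]
      by_cases h : s.contains x
      · obtain ⟨t, ht, hs⟩ := ih s
        refine ⟨t, ?_, hs.cons x⟩
        rw [if_pos (by simpa using h), ht]
      · obtain ⟨t, ht, hs⟩ := ih (s ++ [x])
        refine ⟨x :: t, ?_, hs.cons₂ x⟩
        rw [if_neg (by simpa using h), ht]; simp

theorem pvOfList_sublist (xs : List Int) : (PySem.Set.ofList xs).Sublist xs := by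
  obtain ⟨t, ht, hs⟩ := pvFoldl_add_sublist xs []
  simpa [PySem.Set.ofList, PySem.Set.empty, ht] using hs

theorem pvOfList_pairwise_lt (xs : List Int) (h : xs.Pairwise (· ≤ ·)) :
    (PySem.Set.ofList xs).Pairwise (· < ·) := by
  have h1 : (PySem.Set.ofList xs).Pairwise (· ≤ ·) := List.Pairwise.sublist (pvOfList_sublist xs) h
  have h2 : (PySem.Set.ofList xs).Pairwise (· ≠ ·) := PySem.Set.nodup_ofList xs
  exact (h1.and h2).imp (fun hab => lt_of_le_of_ne hab.1 hab.2)

-- the collapse loop on a key-sorted list yields one pair per distinct key, valued at the run's last entry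
theorem pvCollapse_run (S : List (Int × Int)) (h : S.Pairwise (fun a b => a.1 ≤ b.1)) :
    S.foldl pvCollapse []
      = (PySem.Set.ofList (S.map (fun p => p.1))).map (fun k => (k, pvFVal S k)) := by
  induction S using List.reverseRecOn with
  | nil => rfl
  | append_singleton S p ih =>
      rw [List.pairwise_append] at h
      obtain ⟨hS, -, hle⟩ := h
      have hle' : ∀ q ∈ S, q.1 ≤ p.1 := fun q hq => hle q hq p (by simp)
      rw [List.foldl_append, ih hS]
      simp only [List.foldl_cons, List.foldl_nil]
      have hkeys : PySem.Set.ofList ((S ++ [p]).map (fun p => p.1))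
          = PySem.Set.add (PySem.Set.ofList (S.map (fun p => p.1))) p.1 := by
        simp [PySem.Set.ofList, List.foldl_append]
      have hf : ∀ k, pvFVal (S ++ [p]) k = if p.1 = k then p.2 else pvFVal S k := by
        intro k; unfold pvFVal; rw [List.foldl_append]; rfl
      rw [hkeys]
      obtain ⟨K, hK⟩ : ∃ K, PySem.Set.ofList (S.map (fun p => p.1)) = K := ⟨_, rfl⟩
      rw [hK]
      have hKle : ∀ k ∈ K, k ≤ p.1 := by
        intro k hk
        rw [← hK] at hk
        have hk' : k ∈ S.map (fun p => p.1) := (PySem.Set.mem_ofList _ _).mp hk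
        obtain ⟨q, hq, rfl⟩ := List.mem_map.mp hk'
        exact hle' q hq
      have hKlt : K.Pairwise (· < ·) := by
        rw [← hK]
        exact pvOfList_pairwise_lt _ (hS.map _ (fun a b hab => hab))
      by_cases hmem : p.1 ∈ K
      · have hadd : PySem.Set.add K p.1 = K := by
          simp [PySem.Set.add, hmem]
        rw [hadd]
        obtain ⟨K₀, kl, rfl⟩ : ∃ K₀ kl, K = K₀ ++ [kl] := by
          rcases List.eq_nil_or_concat K with h0 | ⟨K₀, kl, hc⟩
          · rw [h0] at hmem; simp at hmem
          · exact ⟨K₀, kl, by simpa using hc⟩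
        rw [List.pairwise_append] at hKlt
        obtain ⟨-, -, hK0lt⟩ := hKlt
        have hk0 : ∀ a ∈ K₀, a < kl := fun a ha => hK0lt a ha kl (by simp)
        have hpkl : p.1 = kl := by
          rcases List.mem_append.mp hmem with hm | hm
          · have h1 := hk0 _ hm
            have h2 := hKle kl (by simp)
            omega
          · simpa using hm
        have hlhs : pvCollapse ((K₀ ++ [kl]).map (fun k => (k, pvFVal S k))) p
            = K₀.map (fun k => (k, pvFVal S k)) ++ [p] := by
          rw [List.map_append, List.map_singleton]
          unfold pvCollapse
          rw [List.getLast?_concat]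
          simp only [beq_iff_eq, ← hpkl, List.dropLast_concat]
          simp
        rw [hlhs]
        have hrhs : (K₀ ++ [kl]).map (fun k => (k, pvFVal (S ++ [p]) k))
            = K₀.map (fun k => (k, pvFVal S k)) ++ [p] := by
          rw [List.map_append, List.map_singleton]
          congr 1
          · apply List.map_congr_left
            intro a ha
            rw [hf a, if_neg]
            have := hk0 a ha
            omega
          · rw [hf kl, if_pos hpkl, ← hpkl]
        rw [hrhs]
      · have hadd : PySem.Set.add K p.1 = K ++ [p.1] := by
          simp [PySem.Set.add, hmem]
        rw [hadd]
        have hrhs : (K ++ [p.1]).map (fun k => (k, pvFVal (S ++ [p]) k))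
            = K.map (fun k => (k, pvFVal S k)) ++ [p] := by
          rw [List.map_append, List.map_singleton]
          congr 1
          · apply List.map_congr_left
            intro a ha
            rw [hf a, if_neg]
            intro hcon
            exact hmem (hcon ▸ ha)
          · rw [hf p.1, if_pos rfl]
        rw [hrhs]
        rcases List.eq_nil_or_concat K with h0 | ⟨K₀, kl, hc⟩
        · rw [h0]; rfl
        · have hc' : K = K₀ ++ [kl] := by simpa using hc
          subst hc'
          have hklne : ¬ (kl = p.1) := by
            intro hcon
            exact hmem (by rw [hcon]; simp)
          rw [List.map_append, List.map_singleton]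
          unfold pvCollapse
          rw [List.getLast?_concat]
          simp only [beq_iff_eq, if_neg hklne, List.append_assoc]

-- sorted2 with component keys is sorted with the lexicographic key
theorem pvSorted2_eq_sorted_lex (xs : List (Int × Int)) :
    PySem.List.sorted2 xs (fun p => p.1) (fun p => p.2) false
      = PySem.List.sorted xs (fun p => toLex p) false := by
  have hb : (fun (a b : Int × Int) => decide (a.1 < b.1) || (!decide (b.1 < a.1) && decide (a.2 < b.2)))
      = (fun (a b : Int × Int) => decide (toLex a < toLex b)) := by
    funext a b
    rcases lt_trichotomy a.1 b.1 with h | h | h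
    · simp [Prod.Lex.lt_iff, h, asymm h]
    · simp [Prod.Lex.lt_iff, h]
    · simp [Prod.Lex.lt_iff, (ne_of_gt h : a.1 ≠ b.1)]
      omega
  simp only [PySem.List.sorted2, PySem.List.sorted, if_neg (by decide : ¬ (false = true))]
  rw [hb]

theorem merge_contributions_spec : Claim_equal_merge_contributions := by
  intro existing new _ _
  unfold Spec_merge_contributions merge_contributions merge_contributions_alt
  dsimp only
  obtain ⟨ps, hps⟩ : ∃ ps, (existing ++ new).map
      (fun item => (pvItemGet item "date", pvItemGet item "count")) = ps := ⟨_, rfl⟩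
  have hfoldA : new.foldl
        (fun d item => d.insert (pvItemGet item "date") (pvItemGet item "count"))
        (existing.foldl
          (fun d item => d.insert (pvItemGet item "date") (pvItemGet item "count"))
          PySem.Dict.empty)
      = ps.foldl (fun d p => d.insert p.1 p.2) PySem.Dict.empty := by
    rw [← hps, List.foldl_map, List.foldl_append]
  obtain ⟨D, hD⟩ : ∃ D, ps.foldl (fun d p => d.insert p.1 p.2) PySem.Dict.empty = D := ⟨_, rfl⟩
  have hnd : D.keys.Nodup := by
    rw [← hD]
    exact PySem.Dict.nodup_keys_foldl_insert_key ps (fun p => p.1) (fun d p => p.2) _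
      (by simp [PySem.Dict.empty, PySem.Dict.keys])
  have hkeys : D.keys = PySem.Set.ofList (ps.map (fun p => p.1)) := by
    rw [← hD, PySem.Dict.keys_foldl_insert_key ps (fun p => p.1) (fun d p => p.2)]
    rfl
  have hgetD : ∀ k, D.getD k 0 = pvFVal ps k := by
    intro k
    rw [← hD, pvGetD_foldl_insert]
    rfl
  have hitems : D.items = (PySem.Set.ofList (ps.map (fun p => p.1))).map
      (fun k => (k, pvFVal ps k)) := by
    rw [PySem.Dict.items_eq_map_keys D hnd 0, hkeys]
    exact List.map_congr_left (fun a _ => by rw [hgetD])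
  obtain ⟨Ss, hSs⟩ : ∃ Ss, PySem.List.sorted ps (fun p => p.1) false = Ss := ⟨_, rfl⟩
  have hSp : Ss.Pairwise (fun a b => a.1 ≤ b.1) := by
    rw [← hSs]; exact PySem.List.sorted_pairwise ps (fun p => p.1)
  have hperm : Ss.Perm ps := by
    rw [← hSs]; exact PySem.List.sorted_perm ps (fun p => p.1) false
  have hB : Ss.foldl pvCollapse []
      = (PySem.Set.ofList (Ss.map (fun p => p.1))).map (fun k => (k, pvFVal ps k)) := by
    rw [pvCollapse_run Ss hSp]
    exact List.map_congr_left (fun a _ => by rw [← hSs, pvFVal_sorted])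
  have hA : PySem.List.sorted2 D.items (fun p => p.1) (fun p => p.2) false
      = (PySem.Set.ofList (Ss.map (fun p => p.1))).map (fun k => (k, pvFVal ps k)) := by
    rw [pvSorted2_eq_sorted_lex]
    apply PySem.List.sorted_eq_of_perm_of_pairwise_lt
    · rw [hitems]
      apply List.Perm.map
      rw [List.perm_ext_iff_of_nodup (PySem.Set.nodup_ofList _) (PySem.Set.nodup_ofList _)]
      intro a
      rw [PySem.Set.mem_ofList, PySem.Set.mem_ofList]
      exact (hperm.map (fun p => p.1)).mem_iff
    · have hKlt : (PySem.Set.ofList (Ss.map (fun p => p.1))).Pairwise (· < ·) :=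
        pvOfList_pairwise_lt _ (hSp.map _ (fun a b hab => hab))
      rw [List.pairwise_map]
      exact List.Pairwise.imp (fun hab => Prod.Lex.lt_iff.mpr (Or.inl hab)) hKlt
  rw [hfoldA, hD, hA, hps, hSs, hB]
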